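-- pv_equiv track=rewrite | github.com/augasha04/DSA | urinals.py | get_free_urinals
-- ===== SOURCE A (Python) =====
-- def get_free_urinals(urinals):
--     if '11' in urinals:
--         return -1
--     # Initialize variables
--     free = 0
--     i = 0
--     # Count maximum free urinals
--     while i < len(urinals):
--         if urinals[i] == '0':
--             # Check if the previous and next urinals are also free
--             if (i == 0 or urinals[i - 1] == '0') and (i == len(urinals) - 1 or urinals[i + 1] == '0'):
--                 free += 1
--                 # Skip the next urinal since it cannot be used
--                 i += 1
--         i += 1
--     return free
-- ===== SOURCE B (Python) =====
-- def get_free_urinals(urinals):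
--     if '11' in urinals:
--         return -1
--     n = len(urinals)
--     total = 0
--     i = 0
--     while i < n:
--         if urinals[i] == '0':
--             j = i
--             while j < n and urinals[j] == '0':
--                 j += 1
--             L = j - i
--             if i == 0 and j == n:
--                 total += (L + 1) // 2
--             elif i == 0 or j == n:
--                 total += L // 2
--             else:
--                 total += (L - 1) // 2
--             i = j
--         else:
--             i += 1
--     return total
-- ===== Notes on version B (the rewrite author's own statement) =====
-- stated objective: alternative
-- what changed: Replaces A's position-by-position greedy scan (neighbour checks and skip-next stepping at every index) by a run decomposition: B finds each maximal run of '0's and adds a closed-form count per run depending on whether the run touches the string boundaries.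
import Mathlib
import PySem

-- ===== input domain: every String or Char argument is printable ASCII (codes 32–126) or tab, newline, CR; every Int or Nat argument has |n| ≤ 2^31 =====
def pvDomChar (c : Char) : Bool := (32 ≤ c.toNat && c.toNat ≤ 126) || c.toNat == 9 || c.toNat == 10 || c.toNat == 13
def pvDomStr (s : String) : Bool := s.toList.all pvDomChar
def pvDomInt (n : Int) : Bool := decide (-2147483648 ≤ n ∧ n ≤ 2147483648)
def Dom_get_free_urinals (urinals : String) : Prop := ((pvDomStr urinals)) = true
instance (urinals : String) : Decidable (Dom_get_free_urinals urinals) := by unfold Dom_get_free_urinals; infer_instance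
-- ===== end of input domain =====

-- B replaces A's greedy neighbour-checking scan by a run decomposition with a per-run closed form (objective: alternative).

-- ===== PORT A =====
-- A's while loop: index i, accumulator free
def pvALoop (cs : List Char) (i : Nat) (free : Int) : Int :=
  if _h : i < cs.length then
    if cs.getD i ' ' = '0' then
      if (i = 0 ∨ cs.getD (i - 1) ' ' = '0') ∧ (i = cs.length - 1 ∨ cs.getD (i + 1) ' ' = '0') then
        pvALoop cs (i + 2) (free + 1)
      else
        pvALoop cs (i + 1) free
    else
      pvALoop cs (i + 1) free
  else free
termination_by cs.length - i

def get_free_urinals (urinals : String) : Int :=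
  if PySem.Str.isIn "11" urinals then -1
  else pvALoop urinals.toList 0 0

-- ===== PORT B =====
-- B's inner while: advance j over consecutive '0's
def pvZend (cs : List Char) (j : Nat) : Nat :=
  if _h : j < cs.length then
    if cs.getD j ' ' = '0' then pvZend cs (j + 1) else j
  else j
termination_by cs.length - j

-- needed by pvBLoop's termination: pvZend never moves left
theorem pvZend_ge (cs : List Char) (j : Nat) : j ≤ pvZend cs j := by
  unfold pvZend
  split
  · split
    · exact le_trans (Nat.le_succ j) (pvZend_ge cs (j + 1))
    · exact le_refl j
  · exact le_refl j
termination_by cs.length - j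

-- B's outer while: run decomposition with per-run closed form
def pvBLoop (cs : List Char) (i : Nat) (total : Int) : Int :=
  if _h : i < cs.length then
    if h0 : cs.getD i ' ' = '0' then
      let j := pvZend cs (i + 1)
      let L : Int := (j : Int) - (i : Int)
      let add : Int :=
        if i = 0 ∧ j = cs.length then PySem.Int.floordiv (L + 1) 2
        else if i = 0 ∨ j = cs.length then PySem.Int.floordiv L 2
        else PySem.Int.floordiv (L - 1) 2
      pvBLoop cs j (total + add)
    else
      pvBLoop cs (i + 1) total
  else total
termination_by cs.length - i
decreasing_by
  · have := pvZend_ge cs (i + 1); omega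
  · omega

def get_free_urinals_alt (urinals : String) : Int :=
  if PySem.Str.isIn "11" urinals then -1
  else pvBLoop urinals.toList 0 0

-- ===== PRECONDITION & SPEC =====
def Spec_get_free_urinals (urinals : String) (out : Int) : Prop := out = get_free_urinals_alt urinals
instance (urinals : String) (out : Int) : Decidable (Spec_get_free_urinals urinals out) := by unfold Spec_get_free_urinals; infer_instance

-- ===== CLAIM (what is proved, stated in full; the proofs are below) =====
def Claim_equal_get_free_urinals : Prop := ∀ (urinals : String), Dom_get_free_urinals urinals → Spec_get_free_urinals urinals (get_free_urinals urinals)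

-- ===== LEMMAS AND PROOFS =====

-- B's per-run contribution, as Nat division (proof-side normal form of B's `add`)
def pvRunC (i j : Nat) (cs : List Char) : Int :=
  if i = 0 ∧ j = cs.length then (((j - i + 1) / 2 : Nat) : Int)
  else if i = 0 ∨ j = cs.length then (((j - i) / 2 : Nat) : Int)
  else (((j - i - 1) / 2 : Nat) : Int)

theorem pvZend_le_length (cs : List Char) (j : Nat) (h : j ≤ cs.length) :
    pvZend cs j ≤ cs.length := by
  unfold pvZend
  split
  · split
    · exact pvZend_le_length cs (j + 1) (by omega)
    · exact h
  · exact h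
termination_by cs.length - j

theorem pvZend_zeros (cs : List Char) (j : Nat) :
    ∀ q, j ≤ q → q < pvZend cs j → cs.getD q ' ' = '0' := by
  intro q hq hq2
  rw [pvZend] at hq2
  by_cases h : j < cs.length
  · rw [dif_pos h] at hq2
    by_cases h0 : cs.getD j ' ' = '0'
    · rw [if_pos h0] at hq2
      rcases Nat.eq_or_lt_of_le hq with rfl | hlt
      · exact h0
      · exact pvZend_zeros cs (j + 1) q hlt hq2
    · rw [if_neg h0] at hq2; omega
  · rw [dif_neg h] at hq2; omega
termination_by cs.length - j

theorem pvZend_stop (cs : List Char) (j : Nat) :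
    pvZend cs j = cs.length ∨ cs.getD (pvZend cs j) ' ' ≠ '0' := by
  rw [pvZend]
  split
  · split
    · exact pvZend_stop cs (j + 1)
    · next h0 => right; exact h0
  · next h =>
      by_cases hj : j = cs.length
      · left; exact hj
      · right
        rw [List.getD_eq_default _ _ (by omega)]
        decide
termination_by cs.length - j

-- greedy A across a zero run [p, j) whose LEFT condition already holds at p
theorem pvALoop_run_left (cs : List Char) :
    ∀ d p j (acc : Int), j - p = d → p ≤ j → j ≤ cs.length →
    (∀ q, p ≤ q → q < j → cs.getD q ' ' = '0') →
    (j = cs.length ∨ cs.getD j ' ' ≠ '0') →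
    (p = 0 ∨ cs.getD (p - 1) ' ' = '0') →
    pvALoop cs p acc =
      (if j = cs.length then acc + (((j - p + 1) / 2 : Nat) : Int)
       else pvALoop cs j (acc + (((j - p) / 2 : Nat) : Int))) := by
  intro d
  induction d using Nat.strong_induction_on with
  | _ d ih =>
    intro p j acc hd hpj hjn hz hstop hleft
    by_cases hpej : p = j
    · subst hpej
      by_cases hn : p = cs.length
      · rw [if_pos hn, pvALoop, dif_neg (by omega)]
        norm_num
      · rw [if_neg hn]
        norm_num
    · have hplt : p < j := by omega
      have hZp : cs.getD p ' ' = '0' := hz p le_rfl hplt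
      have hpn : p < cs.length := by omega
      by_cases hp1 : p + 1 < j
      · -- place at p, skip, recurse at p + 2
        have hZp1 : cs.getD (p + 1) ' ' = '0' := hz _ (by omega) (by omega)
        rw [pvALoop, dif_pos hpn, if_pos hZp, if_pos ⟨hleft, Or.inr hZp1⟩]
        rw [ih (j - (p + 2)) (by omega) (p + 2) j (acc + 1) rfl (by omega) hjn
            (fun q hq1 hq2 => hz q (by omega) hq2) hstop
            (Or.inr (by simpa using hZp1))]
        split_ifs with hn <;> [skip; congr 1] <;> omega
      · have hpj1 : p + 1 = j := by omega
        by_cases hn : j = cs.length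
        · -- place at the last position (p = length - 1), then exit
          rw [pvALoop, dif_pos hpn, if_pos hZp, if_pos ⟨hleft, Or.inl (by omega)⟩]
          rw [pvALoop, dif_neg (by omega), if_pos hn]
          omega
        · -- right condition fails at p; move to p + 1 = j
          have hZj : cs.getD j ' ' ≠ '0' := hstop.resolve_left hn
          have hcond : ¬((p = 0 ∨ cs.getD (p - 1) ' ' = '0') ∧
              (p = cs.length - 1 ∨ cs.getD (p + 1) ' ' = '0')) := by
            rintro ⟨-, h | h⟩
            · omega
            · exact hZj (hpj1 ▸ h)
          rw [pvALoop, dif_pos hpn, if_pos hZp, if_neg hcond, if_neg hn, hpj1]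
          have h2 : (j - p) / 2 = 0 := by omega
          rw [h2]
          norm_num

-- greedy A across a maximal zero run starting at a run start i
theorem pvALoop_run (cs : List Char) (i j : Nat) (acc : Int)
    (hij : i < j) (hjn : j ≤ cs.length)
    (hz : ∀ q, i ≤ q → q < j → cs.getD q ' ' = '0')
    (hstop : j = cs.length ∨ cs.getD j ' ' ≠ '0')
    (hstart : i = 0 ∨ cs.getD (i - 1) ' ' ≠ '0') :
    pvALoop cs i acc =
      (if j = cs.length then acc + pvRunC i j cs
       else pvALoop cs j (acc + pvRunC i j cs)) := by
  rcases hstart with rfl | hNl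
  · rw [pvALoop_run_left cs (j - 0) 0 j acc rfl (by omega) hjn hz hstop (Or.inl rfl)]
    unfold pvRunC
    split_ifs <;> first | rfl | omega
  · -- left condition fails at i: single failing step to i + 1, then run with left condition true
    have hin : i < cs.length := by omega
    have hZi : cs.getD i ' ' = '0' := hz i le_rfl hij
    have hi0 : i ≠ 0 := by
      intro h; subst h; exact hNl (by simpa using hZi)
    have hcond : ¬((i = 0 ∨ cs.getD (i - 1) ' ' = '0') ∧
        (i = cs.length - 1 ∨ cs.getD (i + 1) ' ' = '0')) := by
      rintro ⟨h | h, -⟩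
      · exact hi0 h
      · exact hNl h
    rw [pvALoop, dif_pos hin, if_pos hZi, if_neg hcond]
    rw [pvALoop_run_left cs (j - (i + 1)) (i + 1) j acc rfl (by omega) hjn
        (fun q h1 h2 => hz q (by omega) h2) hstop
        (Or.inr (by simpa using hZi))]
    unfold pvRunC
    split_ifs <;> first | rfl | omega

-- the two loops agree from any run-start position
theorem pvLoops_eq (cs : List Char) :
    ∀ d i (acc : Int), cs.length - i ≤ d →
    (i = 0 ∨ cs.getD (i - 1) ' ' ≠ '0') →
    pvALoop cs i acc = pvBLoop cs i acc := by
  intro d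
  induction d using Nat.strong_induction_on with
  | _ d ih =>
    intro i acc hd hstart
    by_cases hin : i < cs.length
    · by_cases hZ : cs.getD i ' ' = '0'
      · have hji : i + 1 ≤ pvZend cs (i + 1) := pvZend_ge cs (i + 1)
        have hjn : pvZend cs (i + 1) ≤ cs.length := pvZend_le_length cs (i + 1) (by omega)
        have hz : ∀ q, i ≤ q → q < pvZend cs (i + 1) → cs.getD q ' ' = '0' := by
          intro q h1 h2
          rcases Nat.eq_or_lt_of_le h1 with rfl | h
          · exact hZ
          · exact pvZend_zeros cs (i + 1) q h h2
        have hstop := pvZend_stop cs (i + 1)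
        set j := pvZend cs (i + 1) with hjdef
        have hadd :
            (if i = 0 ∧ j = cs.length then PySem.Int.floordiv ((j : Int) - (i : Int) + 1) 2
             else if i = 0 ∨ j = cs.length then PySem.Int.floordiv ((j : Int) - (i : Int)) 2
             else PySem.Int.floordiv ((j : Int) - (i : Int) - 1) 2) = pvRunC i j cs := by
          have e1 : (j : Int) - (i : Int) + 1 = ((j - i + 1 : Nat) : Int) := by omega
          have e2 : (j : Int) - (i : Int) = ((j - i : Nat) : Int) := by omega
          have e3 : (j : Int) - (i : Int) - 1 = ((j - i - 1 : Nat) : Int) := by omega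
          unfold pvRunC
          rw [e1, e3, e2]
          split_ifs <;> exact_mod_cast PySem.Int.floordiv_natCast _ 2
        rw [pvBLoop, dif_pos hin, dif_pos hZ]
        dsimp only
        rw [← hjdef, hadd]
        rw [pvALoop_run cs i j acc (by omega) hjn hz hstop hstart]
        split_ifs with hn
        · rw [pvBLoop, dif_neg (by omega)]
        · have hZj := hstop.resolve_left hn
          rw [pvALoop, dif_pos (by omega), if_neg hZj]
          rw [pvBLoop, dif_pos (by omega), dif_neg hZj]
          exact ih (cs.length - (j + 1)) (by omega) (j + 1) _ le_rfl
            (Or.inr (by simpa using hZj))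
      · rw [pvALoop, dif_pos hin, if_neg hZ, pvBLoop, dif_pos hin, dif_neg hZ]
        exact ih (cs.length - (i + 1)) (by omega) (i + 1) acc le_rfl
          (Or.inr (by simpa using hZ))
    · rw [pvALoop, dif_neg hin, pvBLoop, dif_neg hin]

-- ===== VERDICT (by name: the statement is the Claim_ definition above) =====
theorem get_free_urinals_spec : Claim_equal_get_free_urinals := by
  intro s _
  unfold Spec_get_free_urinals get_free_urinals get_free_urinals_alt
  split_ifs with h
  · rfl
  · exact pvLoops_eq s.toList s.toList.length 0 0 (by omega) (Or.inl rfl)
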